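-- pv_equiv track=rewrite | github.com/gajowy123/algo | promien.py | promien_naiwny
-- ===== SOURCE A (Python) =====
-- def znajdz_promien(poz, liczby, wartosc, si=None):
--     n = len(liczby)
--     k = max(poz, n - poz)
--     i = 0
--     while i <= k:
--         il = max(0, poz - i)
--         ip = min(poz + i + 1, n)
--         if not si:
--             w = sum(liczby[il:ip])
--         else:
--             w = si[ip] - si[il]
--         if w >= wartosc:
--             return i
--         i += 1
--     return -1
--
-- def promien_naiwny(liczby, wartosci, sumy=False):
--     si = None
--     if sumy:
--         n = len(wartosci)
--         si = [0]
--         for i in liczby: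
--             si.append(si[-1] + i)
--
--     res = []
--     for i, x in enumerate(wartosci):
--         res.append(znajdz_promien(i, liczby, x, si))
--     return res
-- ===== SOURCE B (Python) =====
-- def _promien(pref, n, poz, wartosc):
--     k = max(poz, n - poz)
--     for i in range(k + 1):
--         lo = min(n, max(0, poz - i))
--         hi = min(n, poz + i + 1)
--         if pref[hi] - pref[lo] >= wartosc:
--             return i
--     return -1
--
-- def promien_naiwny(liczby, wartosci, sumy=False):
--     # every window sum is a difference of two prefix sums; the result does not depend on 'sumy'
--     n = len(liczby)
--     pref = [0]
--     s = 0
--     for x in liczby: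
--         s += x
--         pref.append(s)
--     return [_promien(pref, n, poz, x) for poz, x in enumerate(wartosci)]
-- ===== Notes on version B (the rewrite author's own statement) =====
-- stated objective: alternative
-- what changed: B always builds one prefix-sum array with a running accumulator and evaluates every window as a difference of two prefix sums, instead of A's per-radius slice-and-sum rescans (sumy=False) and A's si[-1] re-reads; the result never depends on sumy, so B ignores it.
-- crash fix: When sumy=True and len(wartosci) > len(liczby)+1, A raises IndexError (si indexed past its end); B clamps the window bounds and returns the same radii the slice-based path would. — e.g. on promien_naiwny([1], [1, 1, 1], true): A raises IndexError, B returns [0, 1, 2]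
import Mathlib
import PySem

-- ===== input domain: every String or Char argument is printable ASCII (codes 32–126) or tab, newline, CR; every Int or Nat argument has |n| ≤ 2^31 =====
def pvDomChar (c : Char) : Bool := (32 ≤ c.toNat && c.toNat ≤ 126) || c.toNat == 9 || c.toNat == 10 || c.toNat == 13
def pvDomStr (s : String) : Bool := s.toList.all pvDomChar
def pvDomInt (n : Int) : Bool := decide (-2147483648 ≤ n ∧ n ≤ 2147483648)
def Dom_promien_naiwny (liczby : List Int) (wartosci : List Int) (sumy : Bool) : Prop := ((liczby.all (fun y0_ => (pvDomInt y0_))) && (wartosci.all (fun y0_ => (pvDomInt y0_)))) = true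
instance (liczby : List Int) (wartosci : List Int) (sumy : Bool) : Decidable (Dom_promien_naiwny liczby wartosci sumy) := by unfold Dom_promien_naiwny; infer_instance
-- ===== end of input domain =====

-- B computes each window sum as a difference of two precomputed prefix sums instead of A's per-radius slice rescans; equivalence is about return values (neither mutates its arguments).

-- ===== PORT A =====
-- the 'while i <= k' loop of znajdz_promien; fuel = number of remaining iterations (k+1 at the start)
def znajdzLoop (poz : Int) (liczby : List Int) (wartosc : Int) (si : Option (List Int)) (n : Int) : Nat → Int → Int
  | 0, _ => -1
  | fuel + 1, i =>
    let il := max 0 (poz - i)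
    let ip := min (poz + i + 1) n
    -- 'if not si' : si is None or the empty list
    let w :=
      match si with
      | none => (PySem.List.slice liczby (some il) (some ip)).sum
      | some s =>
        if s.isEmpty then (PySem.List.slice liczby (some il) (some ip)).sum
        else PySem.List.pyGetD s ip 0 - PySem.List.pyGetD s il 0   -- si[ip] - si[il]; in range under Pre_
    if w ≥ wartosc then i else znajdzLoop poz liczby wartosc si n fuel (i + 1)

def znajdz_promien (poz : Int) (liczby : List Int) (wartosc : Int) (si : Option (List Int)) : Int :=
  let n : Int := liczby.length
  let k := max poz (n - poz)
  znajdzLoop poz liczby wartosc si n (k + 1).toNat 0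

def promien_naiwny (liczby : List Int) (wartosci : List Int) (sumy : Bool) : List Int :=
  let si : Option (List Int) :=
    if sumy then
      some (liczby.foldl (fun acc i => acc ++ [PySem.List.pyGetD acc (-1) 0 + i]) [0])  -- si.append(si[-1] + i)
    else none
  (PySem.List.enumerate wartosci 0).foldl (fun res p => res ++ [znajdz_promien p.1 liczby p.2 si]) []

-- ===== PORT B =====
-- the inner 'for i in range(k+1)' of _promien, recursion over the range list
def bFind (pref : List Int) (n poz wartosc : Int) : List Int → Int
  | [] => -1
  | i :: rest =>
    let lo := min n (max 0 (poz - i))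
    let hi := min n (poz + i + 1)
    if PySem.List.pyGetD pref hi 0 - PySem.List.pyGetD pref lo 0 ≥ wartosc then i
    else bFind pref n poz wartosc rest

def bPromien (pref : List Int) (n poz wartosc : Int) : Int :=
  let k := max poz (n - poz)
  bFind pref n poz wartosc (PySem.List.pyRange 0 (k + 1) 1)

def promien_naiwny_alt (liczby : List Int) (wartosci : List Int) (sumy : Bool) : List Int :=
  let n : Int := liczby.length
  let pref := (liczby.foldl (fun (st : Int × List Int) x => (st.1 + x, st.2 ++ [st.1 + x])) (0, [0])).2
  (PySem.List.enumerate wartosci 0).map (fun p => bPromien pref n p.1 p.2)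

-- ===== PRECONDITION & SPEC =====
-- Pre_ excludes exactly the inputs where A raises IndexError: sumy=True with len(wartosci) > len(liczby)+1
-- (si[il] is read at il = poz > len(liczby)).
def Pre_promien_naiwny (liczby : List Int) (wartosci : List Int) (sumy : Bool) : Prop :=
  sumy = true → wartosci.length ≤ liczby.length + 1
instance (liczby : List Int) (wartosci : List Int) (sumy : Bool) : Decidable (Pre_promien_naiwny liczby wartosci sumy) := by unfold Pre_promien_naiwny; infer_instance

def pvWitness_promien_naiwny : List Int × List Int × Bool := ([1, -2, 3], [2, 0, 4], true)

-- A raises IndexError when sumy=True and len(wartosci) > len(liczby)+1; B clamps the window bounds and returns the radii the slice path would.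
def Raises_promien_naiwny (liczby : List Int) (wartosci : List Int) (sumy : Bool) : Prop :=
  sumy = true ∧ liczby.length + 1 < wartosci.length
instance (liczby : List Int) (wartosci : List Int) (sumy : Bool) : Decidable (Raises_promien_naiwny liczby wartosci sumy) := by unfold Raises_promien_naiwny; infer_instance
def pvRaiseWitness_promien_naiwny : List Int × List Int × Bool := ([1], [1, 1, 1], true)
def pvRaiseWitnessOut_promien_naiwny : List Int := [0, 1, 2]

def Spec_promien_naiwny (liczby : List Int) (wartosci : List Int) (sumy : Bool) (out : List Int) : Prop := out = promien_naiwny_alt liczby wartosci sumy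
instance (liczby : List Int) (wartosci : List Int) (sumy : Bool) (out : List Int) : Decidable (Spec_promien_naiwny liczby wartosci sumy out) := by unfold Spec_promien_naiwny; infer_instance

-- ===== CLAIM (what is proved, stated in full; the proofs are below) =====
def Claim_equal_promien_naiwny : Prop := ∀ (liczby : List Int) (wartosci : List Int) (sumy : Bool), Dom_promien_naiwny liczby wartosci sumy → Pre_promien_naiwny liczby wartosci sumy → Spec_promien_naiwny liczby wartosci sumy (promien_naiwny liczby wartosci sumy)

def Claim_raises_promien_naiwny : Prop := (∀ (liczby : List Int) (wartosci : List Int) (sumy : Bool), Dom_promien_naiwny liczby wartosci sumy → Raises_promien_naiwny liczby wartosci sumy → ¬ Pre_promien_naiwny liczby wartosci sumy) ∧ (Dom_promien_naiwny (pvRaiseWitness_promien_naiwny.1) (pvRaiseWitness_promien_naiwny.2.1) (pvRaiseWitness_promien_naiwny.2.2) ∧ Raises_promien_naiwny (pvRaiseWitness_promien_naiwny.1) (pvRaiseWitness_promien_naiwny.2.1) (pvRaiseWitness_promien_naiwny.2.2) ∧ promien_naiwny_alt (pvRaiseWitness_promien_naiwny.1) (pvRaiseWitness_promien_naiwny.2.1)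 (pvRaiseWitness_promien_naiwny.2.2) = pvRaiseWitnessOut_promien_naiwny)

-- ===== LEMMAS AND PROOFS =====

-- reference prefix-sum scan: scan s xs = [s+x1, s+x1+x2, ...]
def scan (s : Int) : List Int → List Int
  | [] => []
  | x :: xs => (s + x) :: scan (s + x) xs

-- B's fold builds (sum, acc ++ scan s liczby)
lemma bPref_eq (xs : List Int) : ∀ (s : Int) (acc : List Int),
    (xs.foldl (fun (st : Int × List Int) x => (st.1 + x, st.2 ++ [st.1 + x])) (s, acc)).2
      = acc ++ scan s xs := by
  induction xs with
  | nil => intro s acc; simp [scan]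
  | cons x xs ih => intro s acc; simp [List.foldl_cons, ih, scan]

-- A's fold (append si[-1] + i) builds the same list
lemma aPref_eq (xs : List Int) : ∀ (s : Int) (acc : List Int) (h : acc ≠ []),
    acc.getLast h = s →
    xs.foldl (fun acc i => acc ++ [PySem.List.pyGetD acc (-1) 0 + i]) acc = acc ++ scan s xs := by
  induction xs with
  | nil => intro s acc h _; simp [scan]
  | cons x xs ih =>
    intro s acc h hs
    rw [List.foldl_cons, PySem.List.pyGetD_neg_one acc 0 h, hs,
        ih (s + x) (acc ++ [s + x]) (by simp) (by simp)]
    simp [scan]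

-- value of the prefix list at a Nat index
lemma scan_getD (xs : List Int) : ∀ (s : Int) (j : Nat), j ≤ xs.length →
    (s :: scan s xs).getD j 0 = s + (xs.take j).sum := by
  induction xs with
  | nil => intro s j hj; simp at hj; simp [hj]
  | cons x xs ih =>
    intro s j hj
    cases j with
    | zero => simp
    | succ j =>
      have h := ih (s + x) j (by simpa using hj)
      simp only [scan, List.getD_cons_succ] at h ⊢
      simp only [List.take_succ_cons, List.sum_cons]
      omega

lemma pref_getD (xs : List Int) (j : Int) (h0 : 0 ≤ j) (hn : j ≤ (xs.length : Int)) :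
    PySem.List.pyGetD (0 :: scan 0 xs) j 0 = (xs.take j.toNat).sum := by
  rw [PySem.List.pyGetD_of_nonneg _ _ h0, scan_getD xs 0 j.toNat (by omega)]
  ring

-- sum of a window as a difference of prefix sums (Nat bounds)
lemma sum_drop_take (xs : List Int) (a b : Nat) (hab : a ≤ b) :
    ((xs.drop a).take (b - a)).sum = (xs.take b).sum - (xs.take a).sum := by
  have h : (xs.take b).sum = (xs.take a).sum + ((xs.drop a).take (b - a)).sum := by
    rw [show b = a + (b - a) by omega, List.take_add, List.sum_append]
    simp
  omega

-- the window value computed by A's slice branch equals B's prefix difference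
lemma window_eq (xs : List Int) (poz i : Int) (hpoz : 0 ≤ poz) (hi : 0 ≤ i) :
    (PySem.List.slice xs (some (max 0 (poz - i))) (some (min (poz + i + 1) (xs.length : Int)))).sum
      = PySem.List.pyGetD (0 :: scan 0 xs) (min ((xs.length : Int)) (poz + i + 1)) 0
        - PySem.List.pyGetD (0 :: scan 0 xs) (min ((xs.length : Int)) (max 0 (poz - i))) 0 := by
  have hn : (0 : Int) ≤ (xs.length : Int) := by positivity
  have ha : (0 : Int) ≤ max 0 (poz - i) := le_max_left _ _
  have hb : (0 : Int) ≤ min (poz + i + 1) (xs.length : Int) := by omega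
  rw [PySem.List.slice_toNat xs ha hb, min_comm ((xs.length : Int)) (poz + i + 1),
      pref_getD xs _ hb (by omega), pref_getD xs _ (by omega) (by omega)]
  by_cases hab : max 0 (poz - i) ≤ min (poz + i + 1) (xs.length : Int)
  · rw [show min ((xs.length : Int)) (max 0 (poz - i)) = max 0 (poz - i) by omega,
        sum_drop_take xs _ _ (by omega)]
  · have h1 : (min (poz + i + 1) (xs.length : Int)).toNat - (max 0 (poz - i)).toNat = 0 := by omega
    have h2 : min ((xs.length : Int)) (max 0 (poz - i)) = min (poz + i + 1) (xs.length : Int) := by omega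
    rw [h1, h2]
    simp

-- A's while loop equals B's range recursion
lemma loop_eq (xs : List Int) (si : Option (List Int))
    (hsi : si = none ∨ si = some (0 :: scan 0 xs))
    (poz wartosc : Int) (hpoz : 0 ≤ poz)
    (hple : si = none ∨ poz ≤ (xs.length : Int)) :
    ∀ (fuel : Nat) (i : Int), 0 ≤ i →
    znajdzLoop poz xs wartosc si (xs.length : Int) fuel i
      = bFind (0 :: scan 0 xs) (xs.length : Int) poz wartosc
          (PySem.List.pyRange i (i + fuel) 1) := by
  intro fuel
  induction fuel with
  | zero =>
    intro i hi
    rw [show i + ((0 : Nat) : Int) = i by simp, PySem.List.pyRange_one_eq_nil (le_refl i)]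
    rfl
  | succ fuel ih =>
    intro i hi
    rw [PySem.List.pyRange_one_cons (by omega : i < i + ((fuel + 1 : Nat) : Int))]
    rcases hsi with h | h <;> subst h
    · simp only [znajdzLoop, bFind]
      rw [window_eq xs poz i hpoz hi]
      split_ifs with hc
      · rfl
      · rw [ih (i + 1) (by omega)]
        congr 2
        push_cast
        ring
    · have hple' : poz ≤ (xs.length : Int) := hple.resolve_left (by simp)
      simp only [znajdzLoop, bFind, List.isEmpty_cons, Bool.false_eq_true, if_false]
      rw [show min ((xs.length : Int)) (max 0 (poz - i)) = max 0 (poz - i) from by omega,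
          min_comm ((xs.length : Int)) (poz + i + 1)]
      split_ifs with hc
      · rfl
      · rw [ih (i + 1) (by omega)]
        congr 2
        push_cast
        ring

lemma point_eq (xs : List Int) (si : Option (List Int))
    (hsi : si = none ∨ si = some (0 :: scan 0 xs))
    (poz wartosc : Int) (hpoz : 0 ≤ poz)
    (hple : si = none ∨ poz ≤ (xs.length : Int)) :
    znajdz_promien poz xs wartosc si
      = bPromien (0 :: scan 0 xs) (xs.length : Int) poz wartosc := by
  unfold znajdz_promien bPromien
  have hk : (0 : Int) ≤ max poz ((xs.length : Int) - poz) := le_trans hpoz (le_max_left _ _)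
  rw [loop_eq xs si hsi poz wartosc hpoz hple _ 0 (le_refl 0)]
  congr 1
  rw [show ((0 : Int) + ((max poz ((xs.length : Int) - poz) + 1).toNat : Int))
        = max poz ((xs.length : Int) - poz) + 1 by omega]

-- ===== VERDICT (by name: the statement is the Claim_ definition above) =====
theorem promien_naiwny_spec : Claim_equal_promien_naiwny := by
  intro liczby wartosci sumy _ hpre
  unfold Spec_promien_naiwny promien_naiwny promien_naiwny_alt
  rw [PySem.List.foldl_append_singleton_eq_map, List.nil_append,
      bPref_eq liczby 0 [0]]
  have hpref : ([0] : List Int) ++ scan 0 liczby = 0 :: scan 0 liczby := by simp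
  rw [hpref]
  apply List.map_congr_left
  intro p hp
  rcases (PySem.List.mem_enumerate_iff _ _ _).mp hp with ⟨k, hk, hpk⟩
  cases sumy with
  | false =>
    simp only [Bool.false_eq_true, if_false]
    exact point_eq liczby none (Or.inl rfl) p.1 p.2 (by subst hpk; simp) (Or.inl rfl)
  | true =>
    have hm : wartosci.length ≤ liczby.length + 1 := hpre rfl
    simp only [if_true]
    rw [aPref_eq liczby 0 [0] (by simp) (by simp), hpref]
    refine point_eq liczby (some (0 :: scan 0 liczby)) (Or.inr rfl) p.1 p.2 (by subst hpk; simp) (Or.inr ?_)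
    subst hpk
    simp only
    omega

@[simp]
theorem promien_naiwny_raises : Claim_raises_promien_naiwny := by
  unfold Claim_raises_promien_naiwny
  constructor
  · intro l w s _ hr hp
    rcases hr with ⟨hs, hlen⟩
    have := hp hs; omega
  · refine ⟨by decide, by decide, by decide⟩
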